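-- pv_equiv track=rewrite | github.com/pinarda/lcr | lcr/data_analysis/RFnew/main.py | find_first_true_cdir
-- ===== SOURCE A (Python) =====
-- def find_first_true_cdir(truepass_dict, cdirs, i):
--     first_true_cdirs = [None] * len(truepass_dict[cdirs[0]][i]['truepass']) # assuming 32 elements in the truepass array
--
--     for idx in range(len(truepass_dict[cdirs[0]][i]['truepass'])):
--         for cdir in cdirs:
--             if truepass_dict[cdir][i]['truepass'][idx]:
--                 first_true_cdirs[idx] = cdir
--                 break
--
--     return first_true_cdirs
-- ===== SOURCE B (Python) =====
-- def find_first_true_cdir(truepass_dict, cdirs, i):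
--     n = len(truepass_dict[cdirs[0]][i]['truepass'])
--     result = [None] * n
--     remaining = n
--     for cdir in cdirs:
--         if remaining == 0:
--             break
--         tp = truepass_dict[cdir][i]['truepass']
--         for idx in range(n):
--             if result[idx] is None and tp[idx]:
--                 result[idx] = cdir
--                 remaining -= 1
--     return result
-- ===== Notes on version B (the rewrite author's own statement) =====
-- stated objective: alternative
-- what changed: A scans cdirs from scratch for every index (idx-outer, cdir-inner with break); B inverts the loops: it walks each cdir once in order, fills only still-empty slots (a None-guard makes the first cdir in order win each slot) and stops as soon as a remaining-counter hits zero.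
import Mathlib
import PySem

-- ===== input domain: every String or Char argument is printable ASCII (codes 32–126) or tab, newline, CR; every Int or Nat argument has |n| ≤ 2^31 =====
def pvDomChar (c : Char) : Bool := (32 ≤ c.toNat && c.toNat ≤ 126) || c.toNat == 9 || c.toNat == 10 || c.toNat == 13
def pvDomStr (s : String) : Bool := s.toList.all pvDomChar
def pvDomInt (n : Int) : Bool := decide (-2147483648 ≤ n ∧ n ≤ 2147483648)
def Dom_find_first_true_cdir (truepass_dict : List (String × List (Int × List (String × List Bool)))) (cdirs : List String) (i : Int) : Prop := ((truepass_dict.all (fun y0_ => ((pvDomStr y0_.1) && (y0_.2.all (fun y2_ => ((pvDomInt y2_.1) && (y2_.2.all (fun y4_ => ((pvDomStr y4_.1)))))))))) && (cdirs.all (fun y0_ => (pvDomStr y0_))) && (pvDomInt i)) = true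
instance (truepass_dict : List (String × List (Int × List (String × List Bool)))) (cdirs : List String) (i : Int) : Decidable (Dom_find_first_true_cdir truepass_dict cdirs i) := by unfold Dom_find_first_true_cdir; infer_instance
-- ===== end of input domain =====

-- B inverts A's loop nesting (cdir-outer with a None-guard and a remaining-counter early exit,
-- instead of idx-outer with break); same cost, return values proved equal on Pre_.

-- shared helper: the chained lookup truepass_dict[c][i]['truepass'] (dict lookup = first match in the association list)
def pvTp? (truepass_dict : List (String × List (Int × List (String × List Bool)))) (c : String) (i : Int) : Option (List Bool) :=
  (truepass_dict.lookup c).bind fun d => (d.lookup i).bind fun d2 => d2.lookup "truepass"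

-- shared helper: truthiness test of truepass_dict[c][i]['truepass'][idx] (both Pythons index exactly this way)
def pvAt (tp : List Bool) (idx : Nat) : Bool :=
  (PySem.List.pyGet? tp (idx : Int)).getD false

-- ===== PORT A =====
-- inner 'for cdir in cdirs: if …: …; break' — first cdir whose truepass is true at idx
def pvFirstA (truepass_dict : List (String × List (Int × List (String × List Bool)))) (i : Int) (idx : Nat) : List String → Option String
  | [] => none
  | c :: cs =>
    if pvAt ((pvTp? truepass_dict c i).getD []) idx then some c
    else pvFirstA truepass_dict i idx cs

def find_first_true_cdir (truepass_dict : List (String × List (Int × List (String × List Bool)))) (cdirs : List String) (i : Int) : List (Option String) :=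
  let c0 := (PySem.List.pyGet? cdirs 0).getD ""
  let n := ((pvTp? truepass_dict c0 i).getD []).length
  (List.range n).map (fun idx => pvFirstA truepass_dict i idx cdirs)

-- ===== PORT B =====
-- state = (result, remaining); Python's 'if remaining == 0: break' is ported as a skip of the
-- loop body — once remaining is 0 it is never changed again, so skipping every later cdir ≡ break
def find_first_true_cdir_alt (truepass_dict : List (String × List (Int × List (String × List Bool)))) (cdirs : List String) (i : Int) : List (Option String) :=
  let c0 := (PySem.List.pyGet? cdirs 0).getD ""
  let n := ((pvTp? truepass_dict c0 i).getD []).length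
  (cdirs.foldl
    (fun (st : List (Option String) × Nat) cdir =>
      if st.2 == 0 then st
      else
        let tp := (pvTp? truepass_dict cdir i).getD []
        (List.range n).foldl
          (fun st2 idx =>
            if (st2.1.getD idx none).isNone && pvAt tp idx
            then (st2.1.set idx (some cdir), st2.2 - 1) else st2)
          st)
    (List.replicate n none, n)).1

-- ===== PRECONDITION & SPEC =====
-- safe access: truepass_dict[c][i]['truepass'][idx] neither KeyErrors nor IndexErrors
def pvSafe (truepass_dict : List (String × List (Int × List (String × List Bool)))) (i : Int) (c : String) (idx : Nat) : Bool :=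
  (pvTp? truepass_dict c i).isSome && decide (idx < ((pvTp? truepass_dict c i).getD []).length)

-- Pre_ excludes exactly the inputs on which A raises (KeyError/IndexError): cdirs empty, its first
-- lookup chain failing, or — at some index — a cdir with a failing chain or a too-short truepass
-- list scanned before the first cdir that is true there.
def Pre_find_first_true_cdir (truepass_dict : List (String × List (Int × List (String × List Bool)))) (cdirs : List String) (i : Int) : Prop :=
  cdirs ≠ [] ∧
  (pvTp? truepass_dict (cdirs.headD "") i).isSome = true ∧
  ∀ idx ∈ List.range ((pvTp? truepass_dict (cdirs.headD "") i).getD []).length,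
    ∀ c ∈ cdirs.takeWhile
        (fun c => !(pvSafe truepass_dict i c idx && pvAt ((pvTp? truepass_dict c i).getD []) idx)),
      pvSafe truepass_dict i c idx = true
instance (truepass_dict : List (String × List (Int × List (String × List Bool)))) (cdirs : List String) (i : Int) : Decidable (Pre_find_first_true_cdir truepass_dict cdirs i) := by unfold Pre_find_first_true_cdir; infer_instance

def pvWitness_find_first_true_cdir : (List (String × List (Int × List (String × List Bool)))) × List String × Int :=
  ([("a", [(0, [("truepass", [true, false])])]), ("b", [(0, [("truepass", [false, true])])])], ["a", "b"], 0)

def Spec_find_first_true_cdir (truepass_dict : List (String × List (Int × List (String × List Bool)))) (cdirs : List String) (i : Int) (out : List (Option String)) : Prop := out = find_first_true_cdir_alt truepass_dict cdirs i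
instance (truepass_dict : List (String × List (Int × List (String × List Bool)))) (cdirs : List String) (i : Int) (out : List (Option String)) : Decidable (Spec_find_first_true_cdir truepass_dict cdirs i out) := by unfold Spec_find_first_true_cdir; infer_instance

-- ===== CLAIM (what is proved, stated in full; the proofs are below) =====
def Claim_equal_find_first_true_cdir : Prop := ∀ (truepass_dict : List (String × List (Int × List (String × List Bool)))) (cdirs : List String) (i : Int), Dom_find_first_true_cdir truepass_dict cdirs i → Pre_find_first_true_cdir truepass_dict cdirs i → Spec_find_first_true_cdir truepass_dict cdirs i (find_first_true_cdir truepass_dict cdirs i)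

-- ===== LEMMAS AND PROOFS =====

-- number of still-empty slots
def pvCnt (r : List (Option String)) : Nat := r.countP (fun v => v.isNone)

-- one pass of B's inner loop over range m, result component only:
-- each still-empty slot j < m with tp[j] true is set to c
theorem pv_inner_char (c : String) (tp : List Bool) (m : Nat) (r : List (Option String)) :
    (List.range m).foldl
      (fun r2 idx => if (r2.getD idx none).isNone && pvAt tp idx then r2.set idx (some c) else r2) r
    = r.mapIdx (fun j v => if decide (j < m) && v.isNone && pvAt tp j then some c else v) := by
  induction m with
  | zero =>
    simp only [List.range_zero, List.foldl_nil]
    apply List.ext_getElem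
    · simp
    · intro j hj hj'
      simp [List.getElem_mapIdx]
  | succ m ih =>
    rw [List.range_succ, List.foldl_append, ih]
    simp only [List.foldl_cons, List.foldl_nil]
    by_cases hm : m < r.length
    · have hg : ((r.mapIdx (fun j v => if decide (j < m) && v.isNone && pvAt tp j then some c else v)).getD m none) = r[m] := by
        rw [List.getD_eq_getElem?_getD, List.getElem?_eq_getElem (by simpa using hm)]
        simp [List.getElem_mapIdx]
      rw [hg]
      by_cases hc : r[m].isNone && pvAt tp m
      · rw [if_pos hc]
        obtain ⟨hc1, hc2⟩ := Bool.and_eq_true_iff.mp hc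
        apply List.ext_getElem
        · simp
        · intro j hj hj'
          have hjr : j < r.length := by simpa using hj'
          simp only [List.getElem_set, List.getElem_mapIdx]
          by_cases hjm : j = m
          · subst hjm
            simp [hc1, hc2]
          · rw [if_neg (by omega : ¬ m = j)]
            have hd : (decide (j < m + 1) : Bool) = decide (j < m) := by
              by_cases h : j < m <;> simp_all <;> omega
            rw [hd]
      · rw [if_neg hc]
        apply List.ext_getElem
        · simp
        · intro j hj hj'
          have hjr : j < r.length := by simpa using hj'
          simp only [List.getElem_mapIdx]
          by_cases hjm : j = m
          · subst hjm
            simp only [show (decide (j < j + 1) : Bool) = true by simp,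
                       show (decide (j < j) : Bool) = false by simp]
            cases h1 : r[j].isNone <;> cases h2 : pvAt tp j <;> simp_all
          · have hd : (decide (j < m + 1) : Bool) = decide (j < m) := by
              by_cases h : j < m <;> simp_all <;> omega
            rw [hd]
    · -- index m is beyond r: the set is a no-op and the new condition never fires for existing j
      have hml : r.length ≤ m := by omega
      have hg : ((r.mapIdx (fun j v => if decide (j < m) && v.isNone && pvAt tp j then some c else v)).getD m none) = none := by
        rw [List.getD_eq_getElem?_getD, List.getElem?_eq_none (by simpa using hml)]
        rfl
      rw [hg]
      have heq : r.mapIdx (fun j v => if decide (j < m + 1) && v.isNone && pvAt tp j then some c else v)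
          = r.mapIdx (fun j v => if decide (j < m) && v.isNone && pvAt tp j then some c else v) := by
        apply List.ext_getElem
        · simp
        · intro j hj hj'
          have hjr : j < r.length := by simpa using hj
          have hd : (decide (j < m + 1) : Bool) = decide (j < m) := by
            by_cases h : j < m <;> simp_all <;> omega
          simp only [List.getElem_mapIdx, hd]
      rw [heq]
      by_cases hp : pvAt tp m
      · rw [if_pos (by simp [hp])]
        exact List.set_eq_of_length_le (by simpa using hml)
      · rw [if_neg (by simp [hp])]

-- the counter never influences the result component of B's inner loop
theorem pv_pair_fst (c : String) (tp : List Bool) :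
    ∀ (l : List Nat) (r : List (Option String)) (k : Nat),
      (l.foldl
        (fun st2 idx => if (st2.1.getD idx none).isNone && pvAt tp idx then (st2.1.set idx (some c), st2.2 - 1) else st2)
        (r, k)).1
      = l.foldl
          (fun r2 idx => if (r2.getD idx none).isNone && pvAt tp idx then r2.set idx (some c) else r2) r := by
  intro l
  induction l with
  | nil => intro r k; rfl
  | cons idx l ih =>
    intro r k
    simp only [List.foldl_cons]
    by_cases hc : (r.getD idx none).isNone && pvAt tp idx
    · rw [if_pos hc, if_pos hc]; exact ih _ _
    · rw [if_neg hc, if_neg hc]; exact ih _ _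

-- B's inner loop keeps the invariant 'counter = number of empty slots' (indices in range)
theorem pv_pair_snd (c : String) (tp : List Bool) :
    ∀ (l : List Nat) (r : List (Option String)), (∀ idx ∈ l, idx < r.length) →
      (l.foldl
        (fun st2 idx => if (st2.1.getD idx none).isNone && pvAt tp idx then (st2.1.set idx (some c), st2.2 - 1) else st2)
        (r, pvCnt r)).2
      = pvCnt ((l.foldl
          (fun st2 idx => if (st2.1.getD idx none).isNone && pvAt tp idx then (st2.1.set idx (some c), st2.2 - 1) else st2)
          (r, pvCnt r)).1) := by
  intro l
  induction l with
  | nil => intro r _; rfl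
  | cons idx l ih =>
    intro r hl
    have hidx : idx < r.length := hl idx (by simp)
    simp only [List.foldl_cons]
    by_cases hc : (r.getD idx none).isNone && pvAt tp idx
    · rw [if_pos hc]
      have hnone : r[idx].isNone = true := by
        have := (Bool.and_eq_true_iff.mp hc).1
        rwa [List.getD_eq_getElem?_getD, List.getElem?_eq_getElem hidx] at this
      have hcnt : pvCnt r - 1 = pvCnt (r.set idx (some c)) := by
        unfold pvCnt
        rw [List.countP_set hidx]
        simp [hnone]
      rw [hcnt]
      exact ih (r.set idx (some c)) (by intro j hj; have := hl j (by simp [hj]); simpa using this)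
    · rw [if_neg hc]
      exact ih r (by intro j hj; exact hl j (by simp [hj]))

-- B's outer fold from an arbitrary partial result with the matching counter: a filled slot stays,
-- an empty slot j < n gets the first cdir (in order) whose truepass is true at j
theorem pv_outer_char (truepass_dict : List (String × List (Int × List (String × List Bool)))) (i : Int) (n : Nat) :
    ∀ (cs : List String) (r : List (Option String)), r.length = n →
      (cs.foldl
        (fun (st : List (Option String) × Nat) cdir =>
          if st.2 == 0 then st
          else
            (List.range n).foldl
              (fun st2 idx =>
                if (st2.1.getD idx none).isNone && pvAt ((pvTp? truepass_dict cdir i).getD []) idx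
                then (st2.1.set idx (some cdir), st2.2 - 1) else st2)
              st)
        (r, pvCnt r)).1
      = r.mapIdx (fun j v => if v.isSome then v else if decide (j < n) then pvFirstA truepass_dict i j cs else none) := by
  intro cs
  induction cs with
  | nil =>
    intro r _
    simp only [List.foldl_nil]
    apply List.ext_getElem
    · simp
    · intro j hj hj'
      simp only [List.getElem_mapIdx]
      cases h : r[j] <;> simp [pvFirstA]
  | cons c cs ih =>
    intro r hlen
    simp only [List.foldl_cons]
    by_cases h0 : pvCnt r = 0
    · -- all slots already filled: this cdir is skipped and every later one changes nothing
      rw [if_pos (by simpa using h0)]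
      rw [ih r hlen]
      have hall : ∀ v ∈ r, v ≠ none := by
        intro v hv
        have := List.countP_eq_zero.mp h0 v hv
        simpa using this
      apply List.ext_getElem
      · simp
      · intro j hj hj'
        have hjr : j < r.length := by simpa using hj
        have hs := hall r[j] (List.getElem_mem hjr)
        simp only [List.getElem_mapIdx]
        cases h : r[j] <;> simp_all
    · rw [if_neg (by simpa using h0)]
      have hfst := pv_pair_fst c ((pvTp? truepass_dict c i).getD []) (List.range n) r (pvCnt r)
      have hsnd := pv_pair_snd c ((pvTp? truepass_dict c i).getD []) (List.range n) r
        (by intro idx hidx; rw [hlen]; simpa using hidx)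
      have hS : ((List.range n).foldl
          (fun st2 idx =>
            if (st2.1.getD idx none).isNone && pvAt ((pvTp? truepass_dict c i).getD []) idx
            then (st2.1.set idx (some c), st2.2 - 1) else st2)
          (r, pvCnt r))
          = (r.mapIdx (fun j v => if decide (j < n) && v.isNone && pvAt ((pvTp? truepass_dict c i).getD []) j then some c else v),
             pvCnt (r.mapIdx (fun j v => if decide (j < n) && v.isNone && pvAt ((pvTp? truepass_dict c i).getD []) j then some c else v))) := by
        have h1 : ((List.range n).foldl
            (fun st2 idx =>
              if (st2.1.getD idx none).isNone && pvAt ((pvTp? truepass_dict c i).getD []) idx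
              then (st2.1.set idx (some c), st2.2 - 1) else st2)
            (r, pvCnt r)).1
            = r.mapIdx (fun j v => if decide (j < n) && v.isNone && pvAt ((pvTp? truepass_dict c i).getD []) j then some c else v) := by
          rw [hfst, pv_inner_char]
        exact Prod.ext h1 (by rw [hsnd, h1])
      rw [hS, ih _ (by simp [hlen]), List.mapIdx_mapIdx]
      apply List.ext_getElem
      · simp
      · intro j hj hj'
        have hjr : j < r.length := by simpa using hj
        simp only [List.getElem_mapIdx, Function.comp]
        by_cases hjn : j < n
        · cases hv : r[j] with
          | some x => simp [hjn]
          | none =>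
            by_cases hp : pvAt ((pvTp? truepass_dict c i).getD []) j
            · simp [hjn, hp, pvFirstA]
            · simp [hjn, hp, pvFirstA]
        · cases hv : r[j] <;> simp [hjn]

-- ===== VERDICT (by name: the statement is the Claim_ definition above) =====
theorem find_first_true_cdir_spec : Claim_equal_find_first_true_cdir := by
  intro truepass_dict cdirs i _ _
  show _ = _
  simp only [find_first_true_cdir, find_first_true_cdir_alt]
  set n := ((pvTp? truepass_dict ((PySem.List.pyGet? cdirs 0).getD "") i).getD []).length with hn
  have hcnt : pvCnt (List.replicate n (none : Option String)) = n := by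
    unfold pvCnt
    simp [List.countP_replicate]
  have h := pv_outer_char truepass_dict i n cdirs (List.replicate n none) (by simp)
  rw [hcnt] at h
  rw [h]
  apply List.ext_getElem
  · simp
  · intro j hj hj'
    have hjn : j < n := by simpa using hj
    simp [List.getElem_mapIdx, hjn]
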